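-- pv_equiv track=rewrite | github.com/Artod/wanderlog | groupingtransactions/python3.py | groupTransactions
-- ===== SOURCE A (Python) =====
-- def groupTransactions(transactions):
--     # Write your code here
--     counter = dict()
--
--     for t in transactions:
--         if t in counter:
--             counter[t] += 1
--         else:
--             counter[t] = 1
--
--     sorted_transactions = sorted(counter.items(), key=lambda x: (-x[1], x[0]))
--     res = [f"{item} {count}" for item, count in sorted_transactions]
--
--     return res
-- ===== SOURCE B (Python) =====
-- def groupTransactions(transactions):
--     # Sort, then count runs of equal adjacent elements (no hash counting).
--     s = sorted(transactions)
--     pairs = []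
--     i = 0
--     n = len(s)
--     while i < n:
--         j = i + 1
--         while j < n and s[j] == s[i]:
--             j += 1
--         pairs.append((s[i], j - i))
--         i = j
--     pairs.sort(key=lambda x: (-x[1], x[0]))
--     return [f"{item} {count}" for item, count in pairs]
-- ===== Notes on version B (the rewrite author's own statement) =====
-- stated objective: alternative
-- what changed: Replaces the dict-based counting pass with sort-then-scan: sort the transactions, count runs of equal adjacent elements in one pass, then apply the same (-count, item) sort and formatting.
import Mathlib
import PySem

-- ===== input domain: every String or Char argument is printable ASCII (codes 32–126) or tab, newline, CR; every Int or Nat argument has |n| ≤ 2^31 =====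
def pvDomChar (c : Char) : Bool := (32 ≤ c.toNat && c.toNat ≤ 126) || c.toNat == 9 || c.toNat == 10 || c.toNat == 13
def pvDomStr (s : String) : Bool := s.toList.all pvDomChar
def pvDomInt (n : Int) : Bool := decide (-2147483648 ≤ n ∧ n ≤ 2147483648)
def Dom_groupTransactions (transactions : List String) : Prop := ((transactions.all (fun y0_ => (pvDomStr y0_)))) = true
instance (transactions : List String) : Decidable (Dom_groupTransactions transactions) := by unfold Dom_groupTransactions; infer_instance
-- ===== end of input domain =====

-- B replaces A's dict-counting pass by sort-then-scan over runs of equal adjacent elements (alternative decomposition, same final sort and formatting).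

-- ===== PORT A =====
def groupTransactions (transactions : List String) : List String :=
  let counter := transactions.foldl
    (fun d t => if d.contains t then d.insert t (d.getD t 0 + 1) else d.insert t 1)
    PySem.Dict.empty
  let sortedTransactions := PySem.List.sorted2 counter.items (fun x => -x.2) (fun x => x.1)
  sortedTransactions.map (fun p => p.1 ++ " " ++ PySem.Int.toStr p.2)

-- ===== PORT B =====
-- the outer while loop of Source B: each step emits the head's run (the inner while
-- counts the equal prefix = takeWhile) and continues after the run (= dropWhile)
def runsB : List String → List (String × Int)
  | [] => []
  | x :: rest =>
      (x, 1 + ((rest.takeWhile (· == x)).length : Int)) :: runsB (rest.dropWhile (· == x))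
termination_by l => l.length
decreasing_by
  have := List.length_dropWhile_le (· == x) rest
  simp; omega

def groupTransactions_alt (transactions : List String) : List String :=
  let s := PySem.List.sorted transactions (fun x => x)
  let pairs := runsB s
  let sortedPairs := PySem.List.sorted2 pairs (fun x => -x.2) (fun x => x.1)
  sortedPairs.map (fun p => p.1 ++ " " ++ PySem.Int.toStr p.2)

-- ===== PRECONDITION & SPEC =====
def Spec_groupTransactions (transactions : List String) (out : List String) : Prop := out = groupTransactions_alt transactions
instance (transactions : List String) (out : List String) : Decidable (Spec_groupTransactions transactions out) := by unfold Spec_groupTransactions; infer_instance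

-- ===== CLAIM (what is proved, stated in full; the proofs are below) =====
def Claim_equal_groupTransactions : Prop := ∀ (transactions : List String), Dom_groupTransactions transactions → Spec_groupTransactions transactions (groupTransactions transactions)

-- ===== LEMMAS AND PROOFS =====

-- A's counting loop is collections-Counter counting
lemma foldA_eq_counter (xs : List String) :
    xs.foldl (fun d t => if d.contains t then d.insert t (d.getD t 0 + 1) else d.insert t 1)
      PySem.Dict.empty = PySem.Dict.counter xs := by
  rw [PySem.List.foldl_congr_mem xs _ (fun d t => d.insert t (d.getD t 0 + 1)) _ ?_]
  · exact PySem.Dict.foldl_insert_getD_add_one_eq_counter xs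
  · intro d t _
    by_cases hc : d.contains t = true
    · simp [hc]
    · simp only [Bool.not_eq_true] at hc
      simp [hc, PySem.Dict.getD_of_not_contains d 0 hc]

-- sorting with the tuple key (-count, item) is sorting by the lexicographic key
lemma sorted2_eq_sorted_lex (xs : List (String × Int)) :
    PySem.List.sorted2 xs (fun x => -x.2) (fun x => x.1) =
      PySem.List.sorted xs (fun x => toLex ((-x.2 : Int), x.1)) := by
  simp only [PySem.List.sorted2, PySem.List.sorted]
  congr 1
  funext acc x
  congr 1
  funext a b
  rcases lt_trichotomy (-a.2 : Int) (-b.2) with h | h | h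
  · simp [Prod.Lex.toLex_lt_toLex, h]
  · simp [Prod.Lex.toLex_lt_toLex, h]
  · simp only [Prod.Lex.toLex_lt_toLex, Bool.false_eq_true, if_false]
    rw [decide_eq_true (by omega : (-b.2 : Int) < -a.2)]
    rw [decide_eq_false (by omega : ¬ ((-a.2 : Int) < -b.2))]
    simp only [Bool.false_or, Bool.not_true, Bool.false_and]
    symm
    rw [decide_eq_false]
    omega

lemma lexKey_injective : Function.Injective (fun x : String × Int => toLex ((-x.2 : Int), x.1)) := by
  intro p q h
  have h' : ((-p.2 : Int), p.1) = ((-q.2 : Int), q.1) := toLex.injective h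
  have h1 : p.1 = q.1 := congrArg Prod.snd h'
  have h2 : (-p.2 : Int) = -q.2 := congrArg Prod.fst h'
  exact Prod.ext h1 (by omega)

-- the first element surviving dropWhile fails the predicate
lemma dropWhile_head_false {α : Type} {p : α → Bool} {l : List α} {y : α} {ys : List α}
    (h : l.dropWhile p = y :: ys) : p y = false := by
  induction l with
  | nil => simp at h
  | cons a l ih =>
    rw [List.dropWhile_cons] at h
    by_cases hp : p a = true
    · rw [if_pos hp] at h
      exact ih h
    · rw [if_neg hp] at h
      cases h
      simpa using hp

-- characterisation of runsB on a weakly increasing list: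
-- its members are exactly (k, count of k), and its keys are strictly increasing
lemma runsB_facts (s : List String) (hs : s.Pairwise (· ≤ ·)) :
    (∀ p : String × Int, p ∈ runsB s ↔ p.1 ∈ s ∧ p.2 = (s.count p.1 : Int)) ∧
      (runsB s).Pairwise (fun a b => a.1 < b.1) := by
  induction s using runsB.induct with
  | case1 => simp [runsB]
  | case2 x rest ih =>
    rw [List.pairwise_cons] at hs
    obtain ⟨hall, hrest⟩ := hs
    have hsplit : rest.takeWhile (· == x) ++ rest.dropWhile (· == x) = rest :=
      List.takeWhile_append_dropWhile
    have ht : ∀ y ∈ rest.takeWhile (· == x), y = x := by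
      intro y hy
      have hb := List.mem_takeWhile_imp hy
      exact eq_of_beq hb
    have hd_pair : (rest.dropWhile (· == x)).Pairwise (· ≤ ·) :=
      hrest.sublist (List.dropWhile_sublist _)
    have hxd : ∀ y ∈ rest.dropWhile (· == x), x < y := by
      cases hdc : rest.dropWhile (· == x) with
      | nil => simp
      | cons y0 d' =>
        have hne : (y0 == x) = false := dropWhile_head_false (p := fun z => z == x) hdc
        have hy0x : x < y0 := by
          have hy0mem : y0 ∈ rest := (List.dropWhile_sublist _).mem (by rw [hdc]; simp)
          exact lt_of_le_of_ne (hall y0 hy0mem) (Ne.symm (by simpa using hne))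
        intro y hy
        rw [List.mem_cons] at hy
        rcases hy with rfl | hy
        · exact hy0x
        · have hpw := hd_pair
          rw [hdc, List.pairwise_cons] at hpw
          exact lt_of_lt_of_le hy0x (hpw.1 y hy)
    have hxnd : x ∉ rest.dropWhile (· == x) := fun hx => lt_irrefl x (hxd x hx)
    have hcount_t : (rest.takeWhile (· == x)).count x = (rest.takeWhile (· == x)).length :=
      List.count_eq_length.2 (fun b hb => (ht b hb).symm)
    have hrc : rest.count x = (rest.takeWhile (· == x)).length := by
      conv_lhs => rw [← hsplit]
      rw [List.count_append, hcount_t, List.count_eq_zero.2 hxnd, Nat.add_zero]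
    have hcountx : ((x :: rest).count x : Int) = 1 + ((rest.takeWhile (· == x)).length : Int) := by
      rw [List.count_cons_self, hrc]
      push_cast; ring
    have hcountk : ∀ k, k ≠ x → (x :: rest).count k = (rest.dropWhile (· == x)).count k := by
      intro k hk
      have hcount_tk : (rest.takeWhile (· == x)).count k = 0 :=
        List.count_eq_zero.2 (fun hkt => hk (ht k hkt))
      have h1 : rest.count k = (rest.dropWhile (· == x)).count k := by
        conv_lhs => rw [← hsplit]
        rw [List.count_append, hcount_tk, Nat.zero_add]
      simp [Ne.symm hk, h1]
    obtain ⟨ihmem, ihpair⟩ := ih hd_pair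
    constructor
    · intro p
      rw [runsB]
      simp only [List.mem_cons, ihmem]
      constructor
      · rintro (rfl | ⟨hpd, hpc⟩)
        · exact ⟨by simp, by simpa using hcountx.symm⟩
        · have hpx : p.1 ≠ x := fun h => hxnd (h ▸ hpd)
          refine ⟨Or.inr ((List.dropWhile_sublist _).mem hpd), ?_⟩
          rw [hpc, hcountk p.1 hpx]
      · rintro ⟨hpm, hpc⟩
        by_cases hpx : p.1 = x
        · left
          have hc2 : p.2 = 1 + ((rest.takeWhile (· == x)).length : Int) := by
            rw [hpc, hpx, hcountx]
          calc p = (p.1, p.2) := rfl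
            _ = (x, 1 + ((rest.takeWhile (· == x)).length : Int)) := by rw [hpx, hc2]
        · right
          have hpd : p.1 ∈ rest.dropWhile (· == x) := by
            rcases hpm with hpm | hpm
            · exact absurd hpm hpx
            · rw [← hsplit, List.mem_append] at hpm
              rcases hpm with hpt | hpd
              · exact absurd (ht _ hpt) hpx
              · exact hpd
          exact ⟨hpd, by rw [hpc, hcountk p.1 hpx]⟩
    · rw [runsB, List.pairwise_cons]
      refine ⟨?_, ihpair⟩
      intro q hq
      exact hxd q.1 ((ihmem q).1 hq).1

-- the pair lists produced by the two strategies are rearrangements of each other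
lemma runs_perm_items (xs : List String) :
    (runsB (PySem.List.sorted xs (fun x => x))).Perm
      ((PySem.Set.ofList xs).map (fun k => (k, (xs.count k : Int)))) := by
  have hperm := PySem.List.sorted_perm xs (fun x => x) false
  obtain ⟨hmem, hpair⟩ := runsB_facts _ (PySem.List.sorted_pairwise xs (fun x => x))
  have hnd1 : (runsB (PySem.List.sorted xs (fun x => x))).Nodup :=
    hpair.imp (fun h => fun he => absurd (congrArg Prod.fst he) (ne_of_lt h))
  have hnd2 : ((PySem.Set.ofList xs).map (fun k => (k, (xs.count k : Int)))).Nodup :=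
    (PySem.Set.nodup_ofList xs).map (fun a b h => congrArg Prod.fst h)
  rw [List.perm_ext_iff_of_nodup hnd1 hnd2]
  intro p
  rw [hmem p, List.mem_map]
  constructor
  · rintro ⟨hm, hc⟩
    refine ⟨p.1, (PySem.Set.mem_ofList xs p.1).2 (hperm.mem_iff.1 hm), ?_⟩
    rw [← hperm.count_eq, ← hc]
  · rintro ⟨k, hk, rfl⟩
    exact ⟨hperm.mem_iff.2 ((PySem.Set.mem_ofList xs k).1 hk), by rw [hperm.count_eq]⟩

-- ===== VERDICT (by name: the statement is the Claim_ definition above) =====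
theorem groupTransactions_spec : Claim_equal_groupTransactions := by
  intro transactions _
  unfold Spec_groupTransactions groupTransactions groupTransactions_alt
  simp only [foldA_eq_counter, PySem.Dict.items_counter, sorted2_eq_sorted_lex]
  rw [PySem.List.sorted_eq_sorted_of_perm _ _ _ lexKey_injective
    ((runs_perm_items transactions).symm)]
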